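-- pv_equiv track=rewrite | github.com/poemyaya/ccks2018task2 | getFeature.py | reVect
-- ===== SOURCE A (Python) =====
-- def reVect(datadicts, words):
--     #S\B\M\E
--     sentVect = [[0] * 4 for i in range(len(words))]
--     for char_i in range(len(words)):
--         char = words[char_i]
--
--         if char in datadicts.keys():
--             values = datadicts[char]
--             for char_j in range(char_i, len(words), 1):
--
--                 charlist = [words[i] for i in range(char_i, char_j + 1, 1)]
--                 name = ''.join(charlist)
--                 if name in values:
--                     if len(charlist) == 1:
--                         sentVect[char_i][0] = 1
--                     elif len(charlist) == 2:
--                         sentVect[char_i][1] = 1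
--                         sentVect[char_j][3] = 1
--                     else:
--                         sentVect[char_i][1] = 1
--                         for k in range(char_i + 1, char_j, 1):
--                             sentVect[k][2] = 1
--                         sentVect[char_j][3] = 1
--     return sentVect
-- ===== SOURCE B (Python) =====
-- def _mark(sent, i, j):
--     if j == i:
--         sent[i][0] = 1
--     elif j == i + 1:
--         sent[i][1] = 1
--         sent[j][3] = 1
--     else:
--         sent[i][1] = 1
--         for k in range(i + 1, j):
--             sent[k][2] = 1
--         sent[j][3] = 1
--
--
-- def reVect(datadicts, words):
--     n = len(words)
--     sent = [[0, 0, 0, 0] for _ in range(n)]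
--     for i in range(n):
--         vals = datadicts.get(words[i])
--         if vals is None:
--             continue
--         valset = set(vals)
--         maxlen = max((len(v) for v in vals), default=0)
--         s = ""
--         for j in range(i, n):
--             s += words[j]
--             if len(s) > maxlen:
--                 break
--             if s in valset:
--                 _mark(sent, i, j)
--     return sent
-- ===== Notes on version B (the rewrite author's own statement) =====
-- stated objective: faster
-- what changed: B builds each candidate substring incrementally (one append per inner step instead of re-joining the whole slice) and breaks the inner scan as soon as the accumulated string is longer than the longest dictionary entry for the start word, with a set for membership tests.
import Mathlib
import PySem

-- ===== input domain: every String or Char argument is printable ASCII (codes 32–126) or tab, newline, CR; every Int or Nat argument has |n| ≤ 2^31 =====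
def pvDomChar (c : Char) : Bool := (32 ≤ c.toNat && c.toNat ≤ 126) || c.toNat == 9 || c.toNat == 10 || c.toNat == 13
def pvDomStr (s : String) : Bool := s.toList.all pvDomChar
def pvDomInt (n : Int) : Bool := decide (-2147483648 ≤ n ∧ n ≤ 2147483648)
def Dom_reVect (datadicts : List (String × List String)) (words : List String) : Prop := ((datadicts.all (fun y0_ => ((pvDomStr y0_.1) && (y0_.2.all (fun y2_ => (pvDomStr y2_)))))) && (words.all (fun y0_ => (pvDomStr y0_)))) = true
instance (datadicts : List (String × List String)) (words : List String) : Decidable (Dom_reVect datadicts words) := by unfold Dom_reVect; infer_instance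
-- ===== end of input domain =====

-- B rebuilds each candidate substring incrementally and stops the inner scan once it is longer
-- than the longest dictionary entry for the start character.

-- shared tiny helper: sentVect[i][j] = 1  (indices are always in range in both programs)
def pySet2 (m : List (List Int)) (i j : Nat) : List (List Int) :=
  m.set i ((m.getD i []).set j 1)

-- ===== PORT A =====
def reVect (datadicts : List (String × List String)) (words : List String) : List (List Int) :=
  (List.range words.length).foldl (fun sentVect char_i =>
    match (PySem.Dict.mk datadicts).get? (words.getD char_i "") with  -- 'char in datadicts.keys()' + 'values = datadicts[char]'
    | none => sentVect
    | some values =>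
        (List.range' char_i (words.length - char_i)).foldl (fun sv char_j =>
          -- charlist = [words[i] for i in range(char_i, char_j+1)]; name = ''.join(charlist)
          if values.contains
              (PySem.Str.join "" ((List.range' char_i (char_j + 1 - char_i)).map (fun i => words.getD i ""))) then
            if ((List.range' char_i (char_j + 1 - char_i)).map (fun i => words.getD i "")).length = 1 then
              pySet2 sv char_i 0
            else if ((List.range' char_i (char_j + 1 - char_i)).map (fun i => words.getD i "")).length = 2 then
              pySet2 (pySet2 sv char_i 1) char_j 3
            else
              pySet2 ((List.range' (char_i + 1) (char_j - (char_i + 1))).foldl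
                        (fun sv k => pySet2 sv k 2) (pySet2 sv char_i 1)) char_j 3
          else sv) sentVect)
    ((List.range words.length).map (fun _ => [0, 0, 0, 0]))

-- ===== PORT B =====
-- Source B's _mark helper
def markSBME (sent : List (List Int)) (i j : Nat) : List (List Int) :=
  if j = i then pySet2 sent i 0
  else if j = i + 1 then pySet2 (pySet2 sent i 1) j 3
  else pySet2 ((List.range' (i + 1) (j - (i + 1))).foldl
                 (fun sv k => pySet2 sv k 2) (pySet2 sent i 1)) j 3

-- Source B's inner 'for j in range(i, n)' loop: s is the accumulator, 'if len(s) > maxlen: break'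
def scanB (words : List String) (valset : PySem.Set String) (maxlen : Int) (i : Nat) :
    List Nat → String → List (List Int) → List (List Int)
  | [], _, sent => sent
  | j :: js, s, sent =>
      if maxlen < PySem.Str.len (s ++ words.getD j "") then sent   -- break
      else scanB words valset maxlen i js (s ++ words.getD j "")
             (if PySem.Set.contains valset (s ++ words.getD j "") then markSBME sent i j else sent)

def reVect_alt (datadicts : List (String × List String)) (words : List String) : List (List Int) :=
  (List.range words.length).foldl (fun sent i =>
    match (PySem.Dict.mk datadicts).get? (words.getD i "") with      -- datadicts.get(words[i])
    | none => sent
    | some vals =>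
        scanB words (PySem.Set.ofList vals)
          (vals.foldl (fun m v => max m (PySem.Str.len v)) 0)        -- max(len(v) for v in vals)
          i (List.range' i (words.length - i)) "" sent)
    ((List.range words.length).map (fun _ => [0, 0, 0, 0]))

-- ===== PRECONDITION & SPEC =====
def Spec_reVect (datadicts : List (String × List String)) (words : List String) (out : List (List Int)) : Prop := out = reVect_alt datadicts words
instance (datadicts : List (String × List String)) (words : List String) (out : List (List Int)) : Decidable (Spec_reVect datadicts words out) := by unfold Spec_reVect; infer_instance

-- ===== CLAIM (what is proved, stated in full; the proofs are below) =====
def Claim_equal_reVect : Prop := ∀ (datadicts : List (String × List String)) (words : List String), Dom_reVect datadicts words → Spec_reVect datadicts words (reVect datadicts words)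

-- ===== LEMMAS AND PROOFS =====

-- A's inner-loop step function, named for the proofs (definitionally A's lambda)
def fA (words values : List String) (char_i : Nat) : List (List Int) → Nat → List (List Int) :=
  fun sv char_j =>
    if values.contains
        (PySem.Str.join "" ((List.range' char_i (char_j + 1 - char_i)).map (fun i => words.getD i ""))) then
      if ((List.range' char_i (char_j + 1 - char_i)).map (fun i => words.getD i "")).length = 1 then
        pySet2 sv char_i 0
      else if ((List.range' char_i (char_j + 1 - char_i)).map (fun i => words.getD i "")).length = 2 then
        pySet2 (pySet2 sv char_i 1) char_j 3
      else
        pySet2 ((List.range' (char_i + 1) (char_j - (char_i + 1))).foldl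
                  (fun sv k => pySet2 sv k 2) (pySet2 sv char_i 1)) char_j 3
    else sv

-- the joined substring words[i:j], as A computes it
def J (words : List String) (i j : Nat) : String :=
  PySem.Str.join "" ((List.range' i (j - i)).map (fun k => words.getD k ""))

lemma chars_join_nil (ll : List (List Char)) : PySem.Chars.join [] ll = ll.flatten := by
  induction ll with
  | nil => simp [PySem.Chars.join_nil]
  | cons a rest ih =>
      cases rest with
      | nil => simp [PySem.Chars.join_singleton]
      | cons b r => simp [PySem.Chars.join_cons_cons] at ih ⊢; simp [ih]

lemma join_empty_concat (l : List String) (x : String) :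
    PySem.Str.join "" (l ++ [x]) = PySem.Str.join "" l ++ x := by
  rw [← String.toList_inj]
  simp [PySem.Str.toList_join, String.toList_append, chars_join_nil]

lemma J_succ (words : List String) {i j : Nat} (h : i ≤ j) :
    J words i (j + 1) = J words i j ++ words.getD j "" := by
  unfold J
  have h1 : j + 1 - i = (j - i) + 1 := by omega
  rw [h1, List.range'_concat]
  have h2 : i + 1 * (j - i) = j := by omega
  rw [h2, List.map_append, List.map_singleton, join_empty_concat]

lemma len_nonneg (s : String) : 0 ≤ PySem.Str.len s := by
  simp [PySem.Str.len_eq]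

lemma J_len_mono (words : List String) {i j : Nat} (h : i ≤ j) :
    PySem.Str.len (J words i j) ≤ PySem.Str.len (J words i (j + 1)) := by
  rw [J_succ words h, PySem.Str.len_append]
  have := len_nonneg (words.getD j "")
  linarith

lemma contains_ofList_eq (values : List String) (s : String) :
    PySem.Set.contains (PySem.Set.ofList values) s = values.contains s := by
  by_cases h : s ∈ values
  · have h2 : s ∈ PySem.Set.ofList values := (PySem.Set.mem_ofList values s).2 h
    simp [PySem.Set.contains, h, h2]
  · have h2 : s ∉ PySem.Set.ofList values := fun hc => h ((PySem.Set.mem_ofList values s).1 hc)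
    simp [PySem.Set.contains, h, h2]

lemma foldA_noop (words values : List String) (L : Int)
    (hv : ∀ v ∈ values, PySem.Str.len v ≤ L) (i : Nat) :
    ∀ (cnt j : Nat) (sv), i ≤ j → L < PySem.Str.len (J words i (j + 1)) →
      (List.range' j cnt).foldl (fA words values i) sv = sv := by
  intro cnt
  induction cnt with
  | zero => intro j sv _ _; rfl
  | succ n ih =>
      intro j sv hij hbig
      rw [List.range'_succ, List.foldl_cons]
      have hstep : fA words values i sv j = sv := by
        have hnm : PySem.Str.join "" ((List.range' i (j + 1 - i)).map (fun i => words.getD i "")) ∉ values := by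
          intro hmem
          have hle := hv _ hmem
          have hJd : PySem.Str.join "" ((List.range' i (j + 1 - i)).map (fun i => words.getD i ""))
              = J words i (j + 1) := rfl
          rw [hJd] at hle
          linarith
        have hc : values.contains
            (PySem.Str.join "" ((List.range' i (j + 1 - i)).map (fun i => words.getD i ""))) = false := by
          simpa using hnm
        unfold fA
        rw [hc]
        simp
      rw [hstep]
      exact ih (j + 1) sv (by omega) (lt_of_lt_of_le hbig (J_len_mono words (by omega)))

lemma foldAB (words values : List String) (L : Int)
    (hv : ∀ v ∈ values, PySem.Str.len v ≤ L) (i : Nat) :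
    ∀ (cnt j : Nat) (sv), i ≤ j →
      (List.range' j cnt).foldl (fA words values i) sv
        = scanB words (PySem.Set.ofList values) L i (List.range' j cnt) (J words i j) sv := by
  intro cnt
  induction cnt with
  | zero => intro j sv hij; rfl
  | succ n ih =>
      intro j sv hij
      have hs' : J words i j ++ words.getD j "" = J words i (j + 1) := (J_succ words hij).symm
      by_cases hL : L < PySem.Str.len (J words i (j + 1))
      · rw [foldA_noop words values L hv i (n + 1) j sv hij hL]
        rw [List.range'_succ]
        simp only [scanB]
        rw [hs', if_pos hL]
      · rw [List.range'_succ, List.foldl_cons]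
        have hJd : PySem.Str.join "" ((List.range' i (j + 1 - i)).map (fun i => words.getD i ""))
            = J words i (j + 1) := rfl
        have hstep : fA words values i sv j =
            (if PySem.Set.contains (PySem.Set.ofList values) (J words i (j + 1))
              then markSBME sv i j else sv) := by
          unfold fA markSBME
          rw [contains_ofList_eq, hJd]
          simp only [List.length_map, List.length_range']
          have e1 : (j + 1 - i = 1) ↔ (j = i) := by omega
          have e2 : (j + 1 - i = 2) ↔ (j = i + 1) := by omega
          simp only [e1, e2]
        rw [hstep]
        simp only [scanB]
        rw [hs', if_neg hL]
        exact ih (j + 1) _ (by omega)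

-- ===== VERDICT (by name: the statement is the Claim_ definition above) =====
theorem reVect_spec : Claim_equal_reVect := by
  intro datadicts words _
  unfold Spec_reVect reVect reVect_alt
  refine List.foldl_ext _ _ _ ?_
  intro sv k _
  cases hg : (PySem.Dict.mk datadicts).get? (words.getD k "") with
  | none => rfl
  | some values =>
      have hv : ∀ v ∈ values,
          PySem.Str.len v ≤ values.foldl (fun m v => max m (PySem.Str.len v)) 0 := by
        intro v hvmem
        rw [show values.foldl (fun m v => max m (PySem.Str.len v)) 0
              = (values.map PySem.Str.len).foldl max 0 from List.foldl_map.symm]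
        exact (PySem.List.le_foldl_max _ _).2 _ (List.mem_map_of_mem hvmem)
      have h := foldAB words values _ hv k (words.length - k) k sv (le_refl k)
      have hJ : J words k k = "" := by unfold J; rw [Nat.sub_self]; rfl
      rw [hJ] at h
      exact h
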